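-- pv_equiv track=rewrite | github.com/ice345/cs61a | hw03/hw03.py | digit_distance
-- ===== SOURCE A (Python) =====
-- def digit_distance(n):
--     """Determines the digit distance of n.
--
--     >>> digit_distance(3)
--     0
--     >>> digit_distance(777)
--     0
--     >>> digit_distance(314)
--     5
--     >>> digit_distance(31415926535)
--     32
--     >>> digit_distance(3464660003)
--     16
--     >>> from construct_check import check
--     >>> # ban all loops
--     >>> check(HW_SOURCE_FILE, 'digit_distance',
--     ...       ['For', 'While'])
--     True
--     """
--     "*** YOUR CODE HERE ***"
--     total = 0
--     if(n>=10):
--         total=abs(n%10-n//10%10)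
--         return total+digit_distance(n//10)
--     else:
--         return total
-- ===== SOURCE B (Python) =====
-- def digit_distance(n):
--     if n < 10:
--         return 0
--     digits = []
--     while n > 0:
--         digits.append(n % 10)
--         n //= 10
--     return sum(abs(a - b) for a, b in zip(digits, digits[1:]))
-- ===== Notes on version B (the rewrite author's own statement) =====
-- stated objective: alternative
-- what changed: B replaces A's arithmetic recursion with an iterative loop that first collects the digit list (low to high) and then sums |a-b| over adjacent pairs via zip.
import Mathlib
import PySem

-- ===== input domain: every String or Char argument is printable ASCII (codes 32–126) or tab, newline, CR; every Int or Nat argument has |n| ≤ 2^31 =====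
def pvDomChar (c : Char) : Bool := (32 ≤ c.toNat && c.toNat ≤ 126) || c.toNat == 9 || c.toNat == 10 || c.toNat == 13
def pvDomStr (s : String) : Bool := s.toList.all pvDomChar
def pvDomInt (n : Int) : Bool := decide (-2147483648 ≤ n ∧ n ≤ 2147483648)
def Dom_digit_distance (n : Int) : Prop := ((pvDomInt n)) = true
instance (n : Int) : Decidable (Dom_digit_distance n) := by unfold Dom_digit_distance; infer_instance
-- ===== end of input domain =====

-- B: iterative digit-list collection plus a pairwise zip sum, instead of A's arithmetic recursion. Same values everywhere.

-- ===== PORT A =====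
def digit_distance (n : Int) : Int :=
  if n ≥ 10 then
    |PySem.Int.mod n 10 - PySem.Int.mod (PySem.Int.floordiv n 10) 10|
      + digit_distance (PySem.Int.floordiv n 10)
  else 0
termination_by n.toNat
decreasing_by
  simp only [PySem.Int.floordiv_eq_ediv_of_pos (by norm_num : (0:Int) < 10)]
  omega

-- ===== PORT B =====
-- the while loop collecting n % 10 and setting n //= 10
def ddDigits (n : Int) : List Int :=
  if 0 < n then PySem.Int.mod n 10 :: ddDigits (PySem.Int.floordiv n 10) else []
termination_by n.toNat
decreasing_by
  simp only [PySem.Int.floordiv_eq_ediv_of_pos (by norm_num : (0:Int) < 10)]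
  omega

def digit_distance_alt (n : Int) : Int :=
  if n < 10 then 0
  else
    let digits := ddDigits n
    ((digits.zip digits.tail).map (fun p => |p.1 - p.2|)).sum

-- ===== PRECONDITION & SPEC =====
def Spec_digit_distance (n : Int) (out : Int) : Prop := out = digit_distance_alt n
instance (n : Int) (out : Int) : Decidable (Spec_digit_distance n out) := by unfold Spec_digit_distance; infer_instance

-- ===== CLAIM (what is proved, stated in full; the proofs are below) =====
def Claim_equal_digit_distance : Prop := ∀ (n : Int), Dom_digit_distance n → Spec_digit_distance n (digit_distance n)

-- ===== LEMMAS AND PROOFS =====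
def pairSum (l : List Int) : Int := ((l.zip l.tail).map (fun p => |p.1 - p.2|)).sum

theorem pairSum_cons_cons (a b : Int) (t : List Int) :
    pairSum (a :: b :: t) = |a - b| + pairSum (b :: t) := by
  simp [pairSum]

theorem key (n : Int) (h : 0 < n) : digit_distance n = pairSum (ddDigits n) := by
  have e10 : PySem.Int.floordiv n 10 = n / 10 :=
    PySem.Int.floordiv_eq_ediv_of_pos (by norm_num)
  by_cases h10 : n ≥ 10
  · have hq : 0 < PySem.Int.floordiv n 10 := by rw [e10]; omega
    have ih := key (PySem.Int.floordiv n 10) hq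
    rw [digit_distance, if_pos h10, ddDigits, if_pos h]
    conv_rhs => rw [ddDigits, if_pos hq]
    conv_rhs at ih => rw [ddDigits, if_pos hq]
    rw [pairSum_cons_cons, ← ih]
  · rw [digit_distance, if_neg h10, ddDigits, if_pos h]
    have hz : PySem.Int.floordiv n 10 = 0 := by rw [e10]; omega
    rw [hz, ddDigits]
    simp [pairSum]
termination_by n.toNat
decreasing_by
  simp only [PySem.Int.floordiv_eq_ediv_of_pos (by norm_num : (0:Int) < 10)]
  omega

-- ===== VERDICT (by name: the statement is the Claim_ definition above) =====
theorem digit_distance_spec : Claim_equal_digit_distance := by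
  intro n _
  unfold Spec_digit_distance digit_distance_alt
  by_cases h : n < 10
  · rw [if_pos h, digit_distance, if_neg (by omega)]
  · rw [if_neg h]
    exact key n (by omega)
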